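-- pv_equiv track=rewrite | github.com/AnchalNigam/Code-Time | binarysearch/allocate_books.py | isValidMinPage
-- ===== SOURCE A (Python) =====
-- def isValidMinPage(minPagesToDistribute, books, students):
--   student = 1
--   pages = 0
--   for idx in range(len(books)):
--     pages += books[idx]
--     if (books[idx] > minPagesToDistribute):
--       return False
--     if pages > minPagesToDistribute:
--       student += 1
--       pages = books[idx]
--     if student > students:
--       return False
--   return True
-- ===== SOURCE B (Python) =====
-- def _rest(cap, books):
--     # Remainder after removing the leading group: the first book always opens
--     # the group, and the group ends just before the first book whose running
--     # sum pushes the total over cap.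
--     total = books[0]
--     for i in range(1, len(books)):
--         total += books[i]
--         if total > cap:
--             return books[i:]
--     return []
--
--
-- def _groups(cap, books):
--     # Count the greedy groups by repeatedly stripping the leading group.
--     g = 0
--     while books:
--         g += 1
--         books = _rest(cap, books)
--     return g
--
--
-- def isValidMinPage(minPagesToDistribute, books, students):
--     if any(b > minPagesToDistribute for b in books):
--         return False
--     g = _groups(minPagesToDistribute, books)
--     return g == 0 or g <= students
-- ===== Notes on version B (the rewrite author's own statement) =====
-- stated objective: alternative
-- what changed: Replaces A's fused per-book state machine (running pages, student counter, three inline early returns) by a staged design: an any() oversized-book pre-check, then an outer loop that repeatedly strips the leading greedy group off the list to count groups, then a single final comparison against students.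
import Mathlib
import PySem

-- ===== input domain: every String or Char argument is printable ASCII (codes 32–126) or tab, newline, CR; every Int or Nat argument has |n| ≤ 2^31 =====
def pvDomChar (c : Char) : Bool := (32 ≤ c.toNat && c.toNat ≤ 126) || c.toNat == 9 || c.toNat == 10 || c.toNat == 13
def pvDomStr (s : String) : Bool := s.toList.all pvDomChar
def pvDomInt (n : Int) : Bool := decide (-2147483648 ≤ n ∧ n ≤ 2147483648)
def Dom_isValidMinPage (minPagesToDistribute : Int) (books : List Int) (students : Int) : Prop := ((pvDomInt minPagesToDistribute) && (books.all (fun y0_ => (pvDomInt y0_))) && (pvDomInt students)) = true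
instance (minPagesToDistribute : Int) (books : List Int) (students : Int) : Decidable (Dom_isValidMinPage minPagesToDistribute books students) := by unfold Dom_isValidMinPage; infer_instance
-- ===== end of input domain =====

-- B restructures A's fused early-return loop into stages: an oversized-book pre-check, then group counting by repeatedly stripping the leading greedy group, then one final comparison; objective: alternative (not faster).


-- ===== PORT A =====
-- A's for-loop over range(len(books)) with early returns, as structural recursion over the
-- books in order, carrying the same (student, pages) state and the same three checks in order.
def isValidMinPageLoop (minPagesToDistribute : Int) (students : Int) :
    List Int → Int → Int → Bool
  | [], _, _ => true
  | b :: rest, student, pages =>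
    if b > minPagesToDistribute then false
    else if pages + b > minPagesToDistribute then
      if student + 1 > students then false
      else isValidMinPageLoop minPagesToDistribute students rest (student + 1) b
    else if student > students then false
    else isValidMinPageLoop minPagesToDistribute students rest student (pages + b)

def isValidMinPage (minPagesToDistribute : Int) (books : List Int) (students : Int) : Bool :=
  isValidMinPageLoop minPagesToDistribute students books 1 0

-- ===== PORT B =====
-- Source B's _rest on a nonempty list books = b :: rest: total starts at books[0] = b, the inner
-- for-loop over books[1:] is this recursion over rest carrying total.
def restGroupAux (cap total : Int) : List Int → List Int
  | [] => []
  | b :: r => if total + b > cap then b :: r else restGroupAux cap (total + b) r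

theorem restGroupAux_length_le (cap : Int) : ∀ (l : List Int) (total : Int),
    (restGroupAux cap total l).length ≤ l.length := by
  intro l
  induction l with
  | nil => intro total; simp [restGroupAux]
  | cons b r ih =>
    intro total
    simp only [restGroupAux]
    split
    · simp
    · exact le_trans (ih (total + b)) (by simp)

-- Source B's _groups: the while loop stripping the leading group each round, as recursion on the list.
def groupsOf (cap : Int) : List Int → Int
  | [] => 0
  | b :: rest => 1 + groupsOf cap (restGroupAux cap b rest)
termination_by l => l.length
decreasing_by simpa using Nat.lt_succ_of_le (restGroupAux_length_le cap rest b)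

def isValidMinPage_alt (minPagesToDistribute : Int) (books : List Int) (students : Int) : Bool :=
  if books.any (fun b => decide (b > minPagesToDistribute)) then false
  else
    let g := groupsOf minPagesToDistribute books
    decide (g = 0) || decide (g ≤ students)

-- ===== PRECONDITION & SPEC =====
def Spec_isValidMinPage (minPagesToDistribute : Int) (books : List Int) (students : Int) (out : Bool) : Prop := out = isValidMinPage_alt minPagesToDistribute books students
instance (minPagesToDistribute : Int) (books : List Int) (students : Int) (out : Bool) : Decidable (Spec_isValidMinPage minPagesToDistribute books students out) := by unfold Spec_isValidMinPage; infer_instance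

-- ===== CLAIM (what is proved, stated in full; the proofs are below) =====
def Claim_equal_isValidMinPage : Prop := ∀ (minPagesToDistribute : Int) (books : List Int) (students : Int), Dom_isValidMinPage minPagesToDistribute books students → Spec_isValidMinPage minPagesToDistribute books students (isValidMinPage minPagesToDistribute books students)

-- ===== LEMMAS AND PROOFS =====

-- proof-side helper: number of NEW groups A's loop starts while consuming l with running `pages`
def gcount (cap : Int) : Int → List Int → Int
  | _, [] => 0
  | pages, b :: r => if pages + b > cap then 1 + gcount cap b r else gcount cap (pages + b) r

theorem gcount_nonneg (cap : Int) : ∀ (l : List Int) (pages : Int), 0 ≤ gcount cap pages l := by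
  intro l
  induction l with
  | nil => intro pages; simp [gcount]
  | cons b r ih =>
    intro pages
    simp only [gcount]
    split
    · have := ih b; omega
    · exact ih (pages + b)

-- B's stripping recursion computes exactly the reset count of A's loop
theorem groupsOf_restGroupAux (cap : Int) : ∀ (l : List Int) (total : Int),
    groupsOf cap (restGroupAux cap total l) = gcount cap total l := by
  intro l
  induction l with
  | nil => intro total; simp [restGroupAux, gcount, groupsOf]
  | cons b r ih =>
    intro total
    simp only [restGroupAux, gcount]
    split
    · simp only [groupsOf]
      rw [ih b]
    · exact ih (total + b)

-- if some book is oversized, A's loop returns false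
theorem loop_oversized (cap students : Int) : ∀ (l : List Int) (student pages : Int),
    (∃ b ∈ l, b > cap) → isValidMinPageLoop cap students l student pages = false := by
  intro l
  induction l with
  | nil => intro _ _ h; simp at h
  | cons b rest ih =>
    intro student pages h
    simp only [isValidMinPageLoop]
    by_cases hb : b > cap
    · simp [hb]
    · have hrest : ∃ x ∈ rest, x > cap := by
        rcases h with ⟨x, hx, hxc⟩
        rcases List.mem_cons.mp hx with h1 | h2
        · exact absurd (h1 ▸ hxc) hb
        · exact ⟨x, h2, hxc⟩
      rw [if_neg hb]
      split
      · split
        · rfl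
        · exact ih _ _ hrest
      · split
        · rfl
        · exact ih _ _ hrest

-- with no oversized book, A's loop on a NONEMPTY list decides student + (reset count) ≤ students
theorem loop_eq_gcount (cap students : Int) : ∀ (l : List Int) (student pages : Int),
    l ≠ [] → (∀ b ∈ l, ¬ b > cap) →
    isValidMinPageLoop cap students l student pages =
      decide (student + gcount cap pages l ≤ students) := by
  intro l
  induction l with
  | nil => intro _ _ h; exact absurd rfl h
  | cons b rest ih =>
    intro student pages _ hok
    have hb : ¬ b > cap := hok b (List.mem_cons_self ..)
    have hrest : ∀ x ∈ rest, ¬ x > cap := fun x hx => hok x (List.mem_cons_of_mem _ hx)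
    simp only [isValidMinPageLoop, gcount, if_neg hb]
    by_cases hc : pages + b > cap
    · simp only [if_pos hc]
      by_cases hs : student + 1 > students
      · have := gcount_nonneg cap rest b
        rw [if_pos hs]
        simp; omega
      · rw [if_neg hs]
        cases rest with
        | nil => simp [isValidMinPageLoop, gcount]; omega
        | cons c t =>
          rw [ih (student + 1) b (by simp) hrest]
          have harith : student + 1 + gcount cap b (c :: t)
              = student + (1 + gcount cap b (c :: t)) := by ring
          rw [harith]
    · simp only [if_neg hc]
      by_cases hs : student > students
      · have := gcount_nonneg cap rest (pages + b)
        rw [if_pos hs]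
        simp; omega
      · rw [if_neg hs]
        cases rest with
        | nil => simp [isValidMinPageLoop, gcount]; omega
        | cons c t => exact ih student (pages + b) (by simp) hrest

-- ===== VERDICT (by name: the statement is the Claim_ definition above) =====
theorem isValidMinPage_spec : Claim_equal_isValidMinPage := by
  intro cap books students _
  unfold Spec_isValidMinPage isValidMinPage isValidMinPage_alt
  by_cases hover : ∃ x ∈ books, x > cap
  · rw [loop_oversized cap students _ _ _ hover]
    have : books.any (fun x => decide (x > cap)) = true := by
      rcases hover with ⟨x, hx, hxc⟩
      exact List.any_eq_true.mpr ⟨x, hx, by simpa using hxc⟩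
    simp [this]
  · have hok : ∀ x ∈ books, ¬ x > cap := by
      intro x hx hgt; exact hover ⟨x, hx, hgt⟩
    have hany : books.any (fun x => decide (x > cap)) = false := by
      simp only [List.any_eq_false]
      intro x hx; simpa using hok x hx
    rw [if_neg (by simp [hany])]
    cases books with
    | nil => simp [isValidMinPageLoop, groupsOf]
    | cons b rest =>
      rw [loop_eq_gcount cap students _ _ _ (by simp) hok]
      have hb : ¬ b > cap := hok b (List.mem_cons_self ..)
      have hz : gcount cap 0 (b :: rest) = gcount cap b rest := by
        simp only [gcount, zero_add, if_neg hb]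
      have hg : groupsOf cap (b :: rest) = 1 + gcount cap b rest := by
        simp only [groupsOf, groupsOf_restGroupAux]
      rw [hz, hg]
      have h1 : 0 ≤ gcount cap b rest := gcount_nonneg cap rest b
      by_cases hle : 1 + gcount cap b rest ≤ students
      · simp [hle]
      · simp [hle]; omega
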